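-- pv_equiv track=rewrite | github.com/eggplantsalt/CAPRA | experiments/robot/capra/eval/procedural_splits.py | _find_target_body
-- ===== SOURCE A (Python) =====
-- from typing import Any, Dict, List, Optional, Tuple
--
-- def _find_target_body(sim, obs: Dict[str, Any], task_description: str) -> Optional[str]:
--     """Heuristically find the target body name from obs keys."""
--     if sim is None:
--         return None
--     # obs keys like 'mug_1_pos' -> body name 'mug_1'
--     candidates = []
--     for key in obs:
--         if key.endswith("_pos"):
--             candidates.append(key[:-4])
--     # Prefer names that appear in task description
--     desc_lower = task_description.lower()
--     for name in candidates:
--         if name.replace("_", " ").lower() in desc_lower: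
--             return name
--     return candidates[0] if candidates else None
-- ===== SOURCE B (Python) =====
-- def _find_target_body(sim, obs, task_description):
--     """Selection-by-minimum: rank every '_pos' candidate by (matches-description?, position)
--     and pick the minimum, instead of two sequential scans."""
--     if sim is None:
--         return None
--     desc = task_description.lower()
--     ranked = [((0 if k[:-4].replace("_", " ").lower() in desc else 1), i, k[:-4])
--               for i, k in enumerate(obs) if k.endswith("_pos")]
--     if not ranked:
--         return None
--     return min(ranked, key=lambda t: (t[0], t[1]))[2]
-- ===== Notes on version B (the rewrite author's own statement) =====
-- stated objective: alternative
-- what changed: Replaces A's two sequential scans (collect candidates, then rescan for a description match, then fall back to the first) by a single selection-by-minimum: each '_pos' key is ranked by the tuple (0 if its name occurs in the lowercased description else 1, position), and the candidate with the lexicographically minimal rank is returned.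
import Mathlib
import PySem

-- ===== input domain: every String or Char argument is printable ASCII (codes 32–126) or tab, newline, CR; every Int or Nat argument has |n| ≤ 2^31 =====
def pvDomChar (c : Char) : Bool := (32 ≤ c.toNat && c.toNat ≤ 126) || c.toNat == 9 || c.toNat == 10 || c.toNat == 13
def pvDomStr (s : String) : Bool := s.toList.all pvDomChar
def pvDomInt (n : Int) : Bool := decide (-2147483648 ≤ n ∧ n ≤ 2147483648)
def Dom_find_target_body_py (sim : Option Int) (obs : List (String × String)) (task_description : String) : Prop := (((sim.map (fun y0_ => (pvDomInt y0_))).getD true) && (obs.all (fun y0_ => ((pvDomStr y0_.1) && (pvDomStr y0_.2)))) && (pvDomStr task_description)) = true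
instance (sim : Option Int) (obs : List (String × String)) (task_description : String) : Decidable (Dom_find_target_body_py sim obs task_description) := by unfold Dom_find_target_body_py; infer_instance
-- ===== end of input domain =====

-- B replaces A's two sequential scans by one selection-by-minimum over (match-rank, position) tuples (objective: alternative).

-- ===== PORT A =====
-- the candidate-collecting loop: for key in obs: if key.endswith("_pos"): candidates.append(key[:-4])
def ftbCollect (obs : List (String × String)) : List String :=
  match obs with
  | [] => []
  | kv :: rest =>
    if PySem.Str.endswith kv.1 "_pos" then
      PySem.Str.slice kv.1 none (some (-4)) :: ftbCollect rest
    else ftbCollect rest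

-- the second loop: for name in candidates: if name.replace("_"," ").lower() in desc_lower: return name
def ftbScan (descLower : String) (cands : List String) : Option String :=
  match cands with
  | [] => none
  | name :: rest =>
    if PySem.Str.isIn (PySem.Str.lower (PySem.Str.replace name "_" " ")) descLower then some name
    else ftbScan descLower rest

def find_target_body_py (sim : Option Int) (obs : List (String × String)) (task_description : String) : Option String :=
  match sim with
  | none => none
  | some _ =>
    let candidates := ftbCollect obs
    let descLower := PySem.Str.lower task_description
    match ftbScan descLower candidates with
    | some name => some name
    | none => candidates.head?

-- ===== PORT B =====
-- rank of a candidate name: 0 if it occurs (spaces for underscores, lowercased) in the description, else 1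
def pvRank (desc name : String) : Nat :=
  if PySem.Str.isIn (PySem.Str.lower (PySem.Str.replace name "_" " ")) desc then 0 else 1

-- the comprehension: [(rank, i, k[:-4]) for i, k in enumerate(obs) if k.endswith("_pos")]
def ftbRanked (desc : String) (obs : List (String × String)) (i : Nat) : List (Nat × Nat × String) :=
  match obs with
  | [] => []
  | kv :: rest =>
    if PySem.Str.endswith kv.1 "_pos" then
      (pvRank desc (PySem.Str.slice kv.1 none (some (-4))), i, PySem.Str.slice kv.1 none (some (-4)))
        :: ftbRanked desc rest (i + 1)
    else ftbRanked desc rest (i + 1)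

-- Python's min with key t[:2]: keep the first element whose key is strictly smaller
def ftbBeats (t b : Nat × Nat × String) : Bool :=
  t.1 < b.1 || (t.1 == b.1 && t.2.1 < b.2.1)

def ftbMin (b : Nat × Nat × String) (L : List (Nat × Nat × String)) : Nat × Nat × String :=
  L.foldl (fun b t => if ftbBeats t b then t else b) b

def find_target_body_py_alt (sim : Option Int) (obs : List (String × String)) (task_description : String) : Option String :=
  match sim with
  | none => none
  | some _ =>
    match ftbRanked (PySem.Str.lower task_description) obs 0 with
    | [] => none
    | h :: t => some (ftbMin h t).2.2

-- ===== PRECONDITION & SPEC =====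
def Spec_find_target_body_py (sim : Option Int) (obs : List (String × String)) (task_description : String) (out : Option String) : Prop := out = find_target_body_py_alt sim obs task_description
instance (sim : Option Int) (obs : List (String × String)) (task_description : String) (out : Option String) : Decidable (Spec_find_target_body_py sim obs task_description out) := by unfold Spec_find_target_body_py; infer_instance

-- ===== CLAIM (what is proved, stated in full; the proofs are below) =====
def Claim_equal_find_target_body_py : Prop := ∀ (sim : Option Int) (obs : List (String × String)) (task_description : String), Dom_find_target_body_py sim obs task_description → Spec_find_target_body_py sim obs task_description (find_target_body_py sim obs task_description)

-- ===== LEMMAS AND PROOFS =====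
-- unfolding one step of the min-fold
theorem ftbMin_cons (b t : Nat × Nat × String) (L : List (Nat × Nat × String)) :
    ftbMin b (t :: L) = ftbMin (if ftbBeats t b then t else b) L := rfl

-- min-fold invariant: with an accumulator whose position precedes every listed position,
-- the fold keeps a rank-0 accumulator, and otherwise picks the first rank-0 candidate (else the accumulator)
theorem ftbMin_ranked (desc : String) (obs : List (String × String)) :
    ∀ (i : Nat) (b : Nat × Nat × String), b.2.1 < i →
      (b.1 = 0 → ftbMin b (ftbRanked desc obs i) = b) ∧
      (b.1 = 1 →
        (match ftbScan desc (ftbCollect obs) with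
         | none => ftbMin b (ftbRanked desc obs i) = b
         | some n => (ftbMin b (ftbRanked desc obs i)).2.2 = n)) := by
  induction obs with
  | nil => intro i b _; simp [ftbRanked, ftbCollect, ftbScan, ftbMin]
  | cons kv rest ih =>
    intro i b hb
    by_cases hend : PySem.Str.endswith kv.1 "_pos"
    · simp only [ftbRanked, ftbCollect, if_pos hend]
      set name := PySem.Str.slice kv.1 none (some (-4)) with hname
      by_cases hin : PySem.Str.isIn (PySem.Str.lower (PySem.Str.replace name "_" " ")) desc
      · -- rank-0 candidate; ftbScan finds it
        have hr : pvRank desc name = 0 := by rw [pvRank, if_pos hin]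
        constructor
        · intro hb0
          have hbf : ftbBeats (pvRank desc name, i, name) b = false := by
            simp only [ftbBeats, hr, hb0]
            simp; omega
          rw [ftbMin_cons, hbf, if_neg (by simp)]
          exact (ih (i + 1) b (Nat.lt_succ_of_lt hb)).1 hb0
        · intro hb1
          rw [ftbScan, if_pos hin]
          have hbt : ftbBeats (pvRank desc name, i, name) b = true := by
            simp only [ftbBeats, hr, hb1]; simp
          rw [ftbMin_cons, hbt, if_pos rfl]
          have := (ih (i + 1) (pvRank desc name, i, name)
            (by simp)).1 hr
          rw [this]
      · -- rank-1 candidate: never beats, the scan skips it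
        have hr : pvRank desc name = 1 := by rw [pvRank, if_neg hin]
        constructor
        · intro hb0
          have hbf : ftbBeats (pvRank desc name, i, name) b = false := by
            simp only [ftbBeats, hr, hb0]; simp
          rw [ftbMin_cons, hbf, if_neg (by simp)]
          exact (ih (i + 1) b (Nat.lt_succ_of_lt hb)).1 hb0
        · intro hb1
          rw [ftbScan, if_neg hin]
          have hbf : ftbBeats (pvRank desc name, i, name) b = false := by
            simp only [ftbBeats, hr, hb1]
            simp; omega
          rw [ftbMin_cons, hbf, if_neg (by simp)]
          exact (ih (i + 1) b (Nat.lt_succ_of_lt hb)).2 hb1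
    · simp only [ftbRanked, ftbCollect, if_neg hend]
      exact ih (i + 1) b (Nat.lt_succ_of_lt hb)

-- the two results coincide at every starting index
theorem ftb_main (desc : String) (obs : List (String × String)) :
    ∀ i : Nat,
      (match ftbRanked desc obs i with
       | [] => none
       | h :: t => some (ftbMin h t).2.2)
      = match ftbScan desc (ftbCollect obs) with
        | some n => some n
        | none => (ftbCollect obs).head? := by
  induction obs with
  | nil => intro i; simp [ftbRanked, ftbCollect, ftbScan]
  | cons kv rest ih =>
    intro i
    by_cases hend : PySem.Str.endswith kv.1 "_pos"
    · simp only [ftbRanked, ftbCollect, if_pos hend]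
      set name := PySem.Str.slice kv.1 none (some (-4)) with hname
      by_cases hin : PySem.Str.isIn (PySem.Str.lower (PySem.Str.replace name "_" " ")) desc
      · have hr : pvRank desc name = 0 := by rw [pvRank, if_pos hin]
        have hmin := (ftbMin_ranked desc rest (i + 1) (pvRank desc name, i, name)
          (by simp)).1 hr
        rw [ftbScan, if_pos hin, hmin]
      · have hr : pvRank desc name = 1 := by rw [pvRank, if_neg hin]
        have h2 := (ftbMin_ranked desc rest (i + 1) (pvRank desc name, i, name)
          (by simp)).2 hr
        rw [ftbScan, if_neg hin]
        cases hscan : ftbScan desc (ftbCollect rest) with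
        | none => rw [hscan] at h2; simp [h2]
        | some n => rw [hscan] at h2; simp [h2]
    · simp only [ftbRanked, ftbCollect, if_neg hend]
      exact ih (i + 1)

-- ===== VERDICT (by name: the statement is the Claim_ definition above) =====
theorem find_target_body_py_spec : Claim_equal_find_target_body_py := by
  intro sim obs td _
  unfold Spec_find_target_body_py find_target_body_py find_target_body_py_alt
  cases sim with
  | none => rfl
  | some v =>
    exact (show
      (match ftbScan (PySem.Str.lower td) (ftbCollect obs) with
       | some name => some name
       | none => (ftbCollect obs).head?)
      = match ftbRanked (PySem.Str.lower td) obs 0 with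
        | [] => none
        | h :: t => some (ftbMin h t).2.2
      from (ftb_main (PySem.Str.lower td) obs 0).symm)
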